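-- pv_equiv track=rewrite | github.com/MarkSG93/midnite-tech-test | api/event.py | _should_raise_alert_for_consecutive_withdrawals
-- ===== SOURCE A (Python) =====
-- import enum
--
-- class EventType(str, enum.Enum):
--     DEPOSIT = "deposit"
--     WITHDRAW = "withdraw"
--
-- TOTAL_WITHDRAWALS_BEFORE_ALERT = 2
--
-- def _should_raise_alert_for_consecutive_withdrawals(user_actions) -> bool:
--     total_consecutive_withdrawals = 1
--     for i, action in enumerate(reversed(user_actions)):
--         if action != EventType.WITHDRAW:
--             break
--         total_consecutive_withdrawals += 1
--         if total_consecutive_withdrawals > TOTAL_WITHDRAWALS_BEFORE_ALERT: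
--             return True
--     return False
-- ===== SOURCE B (Python) =====
-- import enum
--
-- class EventType(str, enum.Enum):
--     DEPOSIT = "deposit"
--     WITHDRAW = "withdraw"
--
-- TOTAL_WITHDRAWALS_BEFORE_ALERT = 2
--
-- def _should_raise_alert_for_consecutive_withdrawals(user_actions) -> bool:
--     n = TOTAL_WITHDRAWALS_BEFORE_ALERT
--     if len(user_actions) < n:
--         return False
--     return all(a == EventType.WITHDRAW for a in user_actions[-n:])
-- ===== Notes on version B (the rewrite author's own statement) =====
-- stated objective: simpler
-- what changed: Replaced the reversed-iteration counter loop with early break/return by a length guard plus a closed-form all() check over the fixed trailing two-element slice.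
import Mathlib
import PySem

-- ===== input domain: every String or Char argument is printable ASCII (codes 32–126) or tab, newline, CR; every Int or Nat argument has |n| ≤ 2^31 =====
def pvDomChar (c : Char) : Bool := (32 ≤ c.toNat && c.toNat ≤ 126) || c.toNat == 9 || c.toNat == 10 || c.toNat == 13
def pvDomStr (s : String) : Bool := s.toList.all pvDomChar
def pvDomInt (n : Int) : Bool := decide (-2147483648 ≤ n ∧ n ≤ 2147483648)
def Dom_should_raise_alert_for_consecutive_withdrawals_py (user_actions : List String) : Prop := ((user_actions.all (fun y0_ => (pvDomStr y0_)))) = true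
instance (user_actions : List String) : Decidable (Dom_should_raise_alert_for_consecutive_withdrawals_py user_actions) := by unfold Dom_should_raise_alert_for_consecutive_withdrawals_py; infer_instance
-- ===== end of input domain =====

-- B replaces A's reversed-iteration counter loop by a length guard plus an all() check over the fixed trailing window (objective: simpler).


-- ===== PORT A =====
-- the for-loop over reversed(user_actions) with counter, break and early return
def pvLoopA : List String → Int → Bool
  | [], _ => false
  | action :: rest, c =>
    if action ≠ "withdraw" then false
    else
      let c' := c + 1
      if c' > 2 then true else pvLoopA rest c'

def should_raise_alert_for_consecutive_withdrawals_py (user_actions : List String) : Bool :=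
  pvLoopA user_actions.reverse 1

-- ===== PORT B =====
def should_raise_alert_for_consecutive_withdrawals_py_alt (user_actions : List String) : Bool :=
  if user_actions.length < 2 then false
  else (PySem.List.slice user_actions (some (-2)) none).all (fun a => a == "withdraw")

-- ===== PRECONDITION & SPEC =====
def Spec_should_raise_alert_for_consecutive_withdrawals_py (user_actions : List String) (out : Bool) : Prop := out = should_raise_alert_for_consecutive_withdrawals_py_alt user_actions
instance (user_actions : List String) (out : Bool) : Decidable (Spec_should_raise_alert_for_consecutive_withdrawals_py user_actions out) := by unfold Spec_should_raise_alert_for_consecutive_withdrawals_py; infer_instance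

-- ===== CLAIM (what is proved, stated in full; the proofs are below) =====
def Claim_equal_should_raise_alert_for_consecutive_withdrawals_py : Prop := ∀ (user_actions : List String), Dom_should_raise_alert_for_consecutive_withdrawals_py user_actions → Spec_should_raise_alert_for_consecutive_withdrawals_py user_actions (should_raise_alert_for_consecutive_withdrawals_py user_actions)

-- ===== LEMMAS AND PROOFS =====

-- A's loop starting at counter 1 only ever inspects the first two elements.
theorem pvLoopA_char (l : List String) :
    pvLoopA l 1 = match l with
      | a :: b :: _ => (a == "withdraw") && (b == "withdraw")
      | _ => false := by
  match l with
  | [] => rfl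
  | [a] => simp [pvLoopA]
  | a :: b :: r =>
    by_cases ha : a = "withdraw" <;> by_cases hb : b = "withdraw" <;>
      simp [pvLoopA, ha, hb]

-- B's trailing window is the reverse of the first two elements of the reversed list.
theorem alt_char (ua : List String) :
    should_raise_alert_for_consecutive_withdrawals_py_alt ua =
      match ua.reverse with
      | a :: b :: _ => (a == "withdraw") && (b == "withdraw")
      | _ => false := by
  unfold should_raise_alert_for_consecutive_withdrawals_py_alt
  rw [PySem.List.slice_from_neg_ofNat ua 2 (by omega)]
  match h : ua.reverse with
  | [] =>
    have : ua = [] := by simpa using congrArg List.reverse h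
    simp [this]
  | [a] =>
    have : ua = [a] := by simpa using congrArg List.reverse h
    simp [this]
  | a :: b :: r =>
    have hua : ua = r.reverse ++ [b, a] := by
      have := congrArg List.reverse h
      simpa using this
    subst hua
    have hlen : (r.reverse ++ [b, a]).length = r.length + 2 := by simp
    rw [hlen]
    simp [Bool.and_comm]

-- ===== VERDICT (by name: the statement is the Claim_ definition above) =====
theorem should_raise_alert_for_consecutive_withdrawals_py_spec : Claim_equal_should_raise_alert_for_consecutive_withdrawals_py := by
  intro ua _
  unfold Spec_should_raise_alert_for_consecutive_withdrawals_py
  rw [alt_char]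
  unfold should_raise_alert_for_consecutive_withdrawals_py
  rw [pvLoopA_char]
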